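-- pv_equiv track=rewrite | github.com/utkarshchawla/NewsBiasDetection | other_titles.py | freq_map
-- ===== SOURCE A (Python) =====
-- def freq_map(s):
--     translationtable = str.maketrans("", "", "!@#$%^&*()-_+=|/<>.`~,:\"")
--     s = s.translate(translationtable)
--     s = s.lower()
--     my_list = s.split(" ")
--     freq = {}
--     for item in my_list:
--         if item in freq:
--             freq[item] += 1
--         else:
--             freq[item] = 1
--     return freq
-- ===== SOURCE B (Python) =====
-- def freq_map(s):
--     words = s.translate(str.maketrans("", "", "!@#$%^&*()-_+=|/<>.`~,:\"")).lower().split(" ")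
--     return {w: words.count(w) for w in dict.fromkeys(words)}
-- ===== Notes on version B (the rewrite author's own statement) =====
-- stated objective: alternative
-- what changed: Replaces the membership-test-and-accumulate dict loop with ordered deduplication (dict.fromkeys) followed by counting each distinct word with list.count.
import Mathlib
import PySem

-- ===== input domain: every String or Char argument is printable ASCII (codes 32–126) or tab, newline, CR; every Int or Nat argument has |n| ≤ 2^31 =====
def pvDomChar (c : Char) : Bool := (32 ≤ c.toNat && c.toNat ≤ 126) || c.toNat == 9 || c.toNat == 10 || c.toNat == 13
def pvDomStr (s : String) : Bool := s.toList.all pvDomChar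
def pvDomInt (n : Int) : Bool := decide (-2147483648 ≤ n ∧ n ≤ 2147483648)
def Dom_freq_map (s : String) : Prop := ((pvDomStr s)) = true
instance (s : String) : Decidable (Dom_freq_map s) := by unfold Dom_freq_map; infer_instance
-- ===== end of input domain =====

-- B counts by deduplicating the word list and counting each distinct word, instead of
-- A's accumulate-into-a-dict loop; same cost class, different decomposition (objective: alternative).

-- s.translate(str.maketrans("", "", punct)) with only a deletechars argument removes exactly
-- those characters; ported by hand as a filter over the char list (exact on the ASCII domain).
def pvPunct : List Char := "!@#$%^&*()-_+=|/<>.`~,:\"".toList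

-- ===== PORT A =====
def freq_map (s : String) : List (String × Int) :=
  let s1 := s.toList.filter (fun c => !pvPunct.contains c)   -- s = s.translate(translationtable)
  let s2 := PySem.Chars.lower s1                             -- s = s.lower()
  let my_list := (PySem.Chars.splitOn s2 [' ']).map String.mk  -- my_list = s.split(" ")
  let freq := my_list.foldl
    (fun freq item =>
      if freq.contains item then freq.insert item (freq.getD item 0 + 1)
      else freq.insert item 1)
    PySem.Dict.empty
  freq.items

-- ===== PORT B =====
def freq_map_alt (s : String) : List (String × Int) :=
  let words :=
    (PySem.Chars.splitOn (PySem.Chars.lower (s.toList.filter (fun c => !pvPunct.contains c))) [' ']).map String.mk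
  (PySem.List.dedup words).map (fun w => (w, (words.count w : Int)))

-- ===== PRECONDITION & SPEC =====
def Spec_freq_map (s : String) (out : List (String × Int)) : Prop := out = freq_map_alt s
instance (s : String) (out : List (String × Int)) : Decidable (Spec_freq_map s out) := by unfold Spec_freq_map; infer_instance

-- ===== CLAIM (what is proved, stated in full; the proofs are below) =====
def Claim_equal_freq_map : Prop := ∀ (s : String), Dom_freq_map s → Spec_freq_map s (freq_map s)

-- ===== LEMMAS AND PROOFS =====

theorem pv_getD_of_not_contains {κ ν : Type} [BEq κ] (d : PySem.Dict κ ν) (k : κ) (v : ν)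
    (h : d.contains k = false) : d.getD k v = v := by
  simp only [PySem.Dict.contains, List.any_eq_false, Bool.not_eq_true, Prod.forall,
    PySem.Dict.getD, PySem.Dict.get?] at *
  have : List.find? (fun p => p.1 == k) d.items = none :=
    List.find?_eq_none.mpr (fun p hp => by simpa using h p.1 p.2 hp)
  rw [this]; rfl

-- A's loop body is exactly the counter step: in the else-branch the key is absent, so getD is 0.
theorem pv_stepA_eq {κ : Type} [BEq κ] :
    (fun (d : PySem.Dict κ Int) x =>
      if d.contains x then d.insert x (d.getD x 0 + 1) else d.insert x 1)
    = (fun (d : PySem.Dict κ Int) x => d.insert x (d.getD x 0 + 1)) := by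
  funext d x
  by_cases h : d.contains x
  · simp [h]
  · simp only [Bool.not_eq_true] at h
    simp [h, pv_getD_of_not_contains d x (0 : Int) h]

theorem pv_items_eq {κ : Type} [BEq κ] [LawfulBEq κ] (ws : List κ) :
    (ws.foldl (fun d x => if d.contains x then d.insert x (d.getD x 0 + 1) else d.insert x 1)
      PySem.Dict.empty).items
    = (PySem.List.dedup ws).map (fun w => (w, (ws.count w : Int))) := by
  rw [pv_stepA_eq, PySem.Dict.foldl_insert_getD_add_one_eq_counter,
    PySem.Dict.items_counter, PySem.List.dedup_eq_ofList]

-- ===== VERDICT (by name: the statement is the Claim_ definition above) =====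
theorem freq_map_spec : Claim_equal_freq_map := by
  intro s _
  unfold Spec_freq_map freq_map freq_map_alt
  exact pv_items_eq _
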